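-- pv_equiv track=rewrite | github.com/Aimeerrhythm/enterprise-change-workflow | hooks/auto-continue.py | _remaining_route
-- ===== SOURCE A (Python) =====
-- _SKILL_ROUTING_ALIASES = {
--     "ecw:tdd": ["TDD:RED", "Implementation(GREEN)", "Fix(GREEN)"],
-- }
--
-- def _remaining_route(routing, current_skill):
--     """Extract steps after current_skill in the routing list.
--
--     routing: list of step strings (YAML routing list from session-state.md).
--     Returns [] when current_skill is not found, not the full chain —
--     injecting the full chain would cause the model to re-run the entire workflow.
--     """
--     if not routing:
--         return []
--     if isinstance(routing, str):
--         # Legacy: accept string for backward compatibility during migration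
--         routing = [s.strip() for s in routing.split("→")]
--
--     aliases = _SKILL_ROUTING_ALIASES.get(current_skill, [])
--     short_name = current_skill.replace("ecw:", "").lower() if current_skill.startswith("ecw:") else ""
--
--     # Use last-match so multi-step skills (e.g., TDD:RED + Implementation(GREEN))
--     # correctly return what follows their final alias step.
--     last_match = -1
--     for i, step in enumerate(routing):
--         step_lower = step.lower()
--         if current_skill == step or (short_name and short_name == step_lower):
--             last_match = i
--         else:
--             for alias in aliases:
--                 if alias.lower() == step_lower:
--                     last_match = i
--                     break
--
--     return routing[last_match + 1:] if last_match != -1 else []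
-- ===== SOURCE B (Python) =====
-- _SKILL_ROUTING_ALIASES = {
--     "ecw:tdd": ["TDD:RED", "Implementation(GREEN)", "Fix(GREEN)"],
-- }
--
-- def _remaining_route(routing, current_skill):
--     """Steps after the last step matching current_skill: reverse scan with early exit."""
--     if not routing:
--         return []
--     if isinstance(routing, str):
--         # Legacy: accept string for backward compatibility during migration
--         routing = [s.strip() for s in routing.split("→")]
--
--     lowered_aliases = [a.lower() for a in _SKILL_ROUTING_ALIASES.get(current_skill, [])]
--     short_name = current_skill.replace("ecw:", "").lower() if current_skill.startswith("ecw:") else ""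
--
--     def matches(step):
--         low = step.lower()
--         return current_skill == step or (short_name and short_name == low) or low in lowered_aliases
--
--     for i in range(len(routing) - 1, -1, -1):
--         if matches(routing[i]):
--             return routing[i + 1:]
--     return []
-- ===== Notes on version B (the rewrite author's own statement) =====
-- stated objective: alternative
-- what changed: Replaces A's forward enumerate-fold that accumulates a last_match index (with a nested for-break over aliases) and then slices, by a single combined match predicate over a pre-lowered alias list and a reverse index scan that returns routing[i+1:] at the first (i.e. last) match.
import Mathlib
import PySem

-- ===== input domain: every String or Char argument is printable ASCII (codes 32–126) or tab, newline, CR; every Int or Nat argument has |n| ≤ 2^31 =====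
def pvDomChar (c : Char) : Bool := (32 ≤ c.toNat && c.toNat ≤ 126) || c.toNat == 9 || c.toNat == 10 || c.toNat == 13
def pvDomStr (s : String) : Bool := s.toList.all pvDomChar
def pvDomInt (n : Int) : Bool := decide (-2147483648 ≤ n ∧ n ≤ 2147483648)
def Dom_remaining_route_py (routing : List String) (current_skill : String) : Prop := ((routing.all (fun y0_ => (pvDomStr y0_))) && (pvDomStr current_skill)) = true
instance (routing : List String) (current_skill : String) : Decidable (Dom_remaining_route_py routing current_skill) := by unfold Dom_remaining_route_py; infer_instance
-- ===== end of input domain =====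

-- B replaces A's forward fold that remembers the last matching index by a reverse
-- index scan with early exit through one match predicate (objective: alternative decomposition).
-- Under the List String type convention the legacy string-split branch of the Python is unreachable.

-- ===== PORT A =====
def remaining_route_py (routing : List String) (current_skill : String) : List String :=
  if routing = [] then []
  else
    let aliases : List String :=
      if current_skill = "ecw:tdd" then ["TDD:RED", "Implementation(GREEN)", "Fix(GREEN)"] else []
    let short_name : String :=
      if PySem.Str.startswith current_skill "ecw:"
      then PySem.Str.lower (PySem.Str.replace current_skill "ecw:" "") else ""
    let last_match : Int :=
      (PySem.List.enumerate routing 0).foldl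
        (fun lm p =>
          let step_lower := PySem.Str.lower p.2
          if current_skill = p.2 ∨ (short_name ≠ "" ∧ short_name = step_lower) then p.1
          else
            -- inner for-with-break over aliases: first alias with alias.lower() == step_lower
            match aliases.find? (fun a => PySem.Str.lower a == step_lower) with
            | some _ => p.1
            | none => lm) (-1)
    if last_match ≠ -1 then PySem.List.slice routing (some (last_match + 1)) none else []

-- ===== PORT B =====
def pvMatchesB (current_skill short_name : String) (lowered_aliases : List String) (step : String) : Bool :=
  let low := PySem.Str.lower step
  current_skill == step || (short_name != "" && short_name == low) || lowered_aliases.contains low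

-- for i in range(len(routing)-1, -1, -1): early return at the first (i.e. last) match
def pvRevScan (routing : List String) (M : String → Bool) : Nat → List String
  | 0 => []
  | n + 1 => if M (routing.getD n "") then routing.drop (n + 1) else pvRevScan routing M n

def remaining_route_py_alt (routing : List String) (current_skill : String) : List String :=
  if routing = [] then []
  else
    let lowered_aliases : List String :=
      (if current_skill = "ecw:tdd" then ["TDD:RED", "Implementation(GREEN)", "Fix(GREEN)"] else []).map PySem.Str.lower
    let short_name : String :=
      if PySem.Str.startswith current_skill "ecw:"
      then PySem.Str.lower (PySem.Str.replace current_skill "ecw:" "") else ""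
    pvRevScan routing (pvMatchesB current_skill short_name lowered_aliases) routing.length

-- ===== PRECONDITION & SPEC =====
def Spec_remaining_route_py (routing : List String) (current_skill : String) (out : List String) : Prop := out = remaining_route_py_alt routing current_skill
instance (routing : List String) (current_skill : String) (out : List String) : Decidable (Spec_remaining_route_py routing current_skill out) := by unfold Spec_remaining_route_py; infer_instance

-- ===== CLAIM (what is proved, stated in full; the proofs are below) =====
def Claim_equal_remaining_route_py : Prop := ∀ (routing : List String) (current_skill : String), Dom_remaining_route_py routing current_skill → Spec_remaining_route_py routing current_skill (remaining_route_py routing current_skill)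

-- ===== LEMMAS AND PROOFS =====

-- index of the last element satisfying P
def pvLastIdx (P : String → Bool) : List String → Option Nat
  | [] => none
  | x :: xs =>
    match pvLastIdx P xs with
    | some j => some (j + 1)
    | none => if P x then some 0 else none

def pvP (cs short : String) (al : List String) (step : String) : Bool :=
  decide (cs = step) ||
    (short != "" && (short == PySem.Str.lower step)) ||
    (al.find? (fun a => PySem.Str.lower a == PySem.Str.lower step)).isSome

theorem pvFoldA (cs short : String) (al : List String) :
    ∀ (l : List String) (s acc : Int),
      (PySem.List.enumerate l s).foldl
        (fun lm p =>
          let step_lower := PySem.Str.lower p.2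
          if cs = p.2 ∨ (short ≠ "" ∧ short = step_lower) then p.1
          else
            match al.find? (fun a => PySem.Str.lower a == step_lower) with
            | some _ => p.1
            | none => lm) acc
      = match pvLastIdx (pvP cs short al) l with
        | some j => s + j
        | none => acc := by
  intro l
  induction l with
  | nil => intro s acc; simp [PySem.List.enumerate_nil, pvLastIdx]
  | cons x xs ih =>
    intro s acc
    rw [PySem.List.enumerate_cons]
    simp only [List.foldl_cons]
    rw [ih]
    have hstep :
        (if cs = x ∨ (short ≠ "" ∧ short = PySem.Str.lower x) then s
         else
           match al.find? (fun a => PySem.Str.lower a == PySem.Str.lower x) with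
           | some _ => s
           | none => acc)
        = if pvP cs short al x then s else acc := by
      simp only [pvP]
      by_cases h1 : cs = x ∨ (short ≠ "" ∧ short = PySem.Str.lower x)
      · simp only [if_pos h1]
        have : (decide (cs = x) || (short != "" && (short == PySem.Str.lower x))) = true := by
          rcases h1 with h | ⟨h, h'⟩
          · simp [h]
          · have hb : (short != "") = true := bne_iff_ne.mpr h
            have he : (short == PySem.Str.lower x) = true := beq_iff_eq.mpr h'
            simp [hb, he]
        simp [this]
      · simp only [if_neg h1]
        have hb : (decide (cs = x) || (short != "" && (short == PySem.Str.lower x))) = false := by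
          push Not at h1
          rcases h1 with ⟨ha, hbs⟩
          by_cases hs : short = ""
          · simp [ha, hs]
          · simp [ha, hs, hbs hs]
        simp only [hb, Bool.false_or]
        obtain _ | a := al.find? (fun a => PySem.Str.lower a == PySem.Str.lower x) <;> simp
    rw [hstep]
    cases hxs : pvLastIdx (pvP cs short al) xs with
    | some j =>
      simp only [pvLastIdx, hxs]
      push_cast
      ring
    | none =>
      by_cases hx : pvP cs short al x <;> simp [pvLastIdx, hxs, hx]

theorem pvLastIdx_concat (P : String → Bool) :
    ∀ (xs : List String) (y : String),
      pvLastIdx P (xs ++ [y]) = if P y then some xs.length else pvLastIdx P xs := by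
  intro xs y
  induction xs with
  | nil => by_cases hy : P y <;> simp [pvLastIdx, hy]
  | cons x xs ih =>
    simp only [List.cons_append, pvLastIdx, ih]
    by_cases hy : P y
    · simp [hy]
    · simp [hy]

theorem pvRevScan_eq (l : List String) (M : String → Bool) :
    ∀ (n : Nat), n ≤ l.length →
      pvRevScan l M n
      = match pvLastIdx M (l.take n) with
        | some j => l.drop (j + 1)
        | none => [] := by
  intro n
  induction n with
  | zero => intro _; simp [pvRevScan, pvLastIdx]
  | succ n ih =>
    intro hn
    have hn' : n < l.length := by omega
    have htake : l.take (n + 1) = l.take n ++ [l[n]] := List.take_succ_eq_append_getElem hn'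
    have hget : l.getD n "" = l[n] := List.getD_eq_getElem l "" hn'
    simp only [pvRevScan, hget, htake, pvLastIdx_concat]
    by_cases hm : M l[n]
    · simp [hm, List.length_take, Nat.min_eq_left (le_of_lt hn')]
    · simp [hm, ih (le_of_lt hn')]

theorem pvMatches_eq (cs short : String) (al : List String) :
    pvMatchesB cs short (al.map PySem.Str.lower) = pvP cs short al := by
  funext step
  apply Bool.eq_iff_iff.mpr
  simp only [pvMatchesB, pvP, Bool.or_eq_true, Bool.and_eq_true, beq_iff_eq, bne_iff_ne,
    decide_eq_true_eq, List.contains_iff_mem, List.mem_map, List.find?_isSome]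

-- ===== VERDICT (by name: the statement is the Claim_ definition above) =====
theorem remaining_route_py_spec : Claim_equal_remaining_route_py := by
  intro routing current_skill _
  unfold Spec_remaining_route_py remaining_route_py remaining_route_py_alt
  by_cases hr : routing = []
  · simp [hr]
  · simp only [if_neg hr]
    rw [pvFoldA, pvMatches_eq,
        pvRevScan_eq routing _ routing.length le_rfl, List.take_length]
    cases hL : pvLastIdx (pvP current_skill
        (if PySem.Str.startswith current_skill "ecw:"
         then PySem.Str.lower (PySem.Str.replace current_skill "ecw:" "") else "")
        (if current_skill = "ecw:tdd"
         then ["TDD:RED", "Implementation(GREEN)", "Fix(GREEN)"] else [])) routing with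
    | none => simp
    | some j =>
      simp only
      have hj : (0 : Int) + (j : Int) ≠ -1 := by omega
      rw [if_pos hj]
      have hcast : (0 : Int) + (j : Int) + 1 = ((j + 1 : Nat) : Int) := by push_cast; ring
      rw [hcast, PySem.List.slice_from_natCast]
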